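-- pv_equiv track=rewrite | github.com/QitaoXu/Lintcode | Alog+/class6/stoneGame.py | get_range_sum
-- ===== SOURCE A (Python) =====
-- def get_range_sum(A):
--
--     n = len(A)
--     range_sum = [[0 for _ in range(n)] for _ in range(n)]
--
--     for i in range(0, n):
--         range_sum[i][i] = A[i]
--
--         for j in range(i + 1, n):
--
--             range_sum[i][j] = range_sum[i][j - 1] + A[j]
--
--     return range_sum
-- ===== SOURCE B (Python) =====
-- def get_range_sum(A):
--     n = len(A)
--     P = [0]
--     s = 0
--     for a in A:
--         s += a
--         P.append(s)
--     return [[P[j + 1] - P[i] if j >= i else 0 for j in range(n)] for i in range(n)]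
-- ===== Notes on version B (the rewrite author's own statement) =====
-- stated objective: alternative
-- what changed: B computes a 1D prefix-sum array once and fills each cell as a subtraction P[j+1]-P[i], instead of A's row-by-row incremental accumulation into a preallocated table.
import Mathlib
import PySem

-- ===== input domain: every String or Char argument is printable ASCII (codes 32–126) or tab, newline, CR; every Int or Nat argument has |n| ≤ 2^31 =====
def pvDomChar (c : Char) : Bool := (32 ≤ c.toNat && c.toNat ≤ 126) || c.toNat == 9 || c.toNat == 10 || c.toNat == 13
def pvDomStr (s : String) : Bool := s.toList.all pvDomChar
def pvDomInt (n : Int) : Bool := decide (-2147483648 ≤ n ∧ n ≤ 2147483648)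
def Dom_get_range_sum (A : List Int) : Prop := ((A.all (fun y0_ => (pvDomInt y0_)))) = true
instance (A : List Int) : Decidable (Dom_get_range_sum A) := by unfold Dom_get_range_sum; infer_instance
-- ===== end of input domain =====

-- B replaces A's row-by-row incremental accumulation with a one-pass prefix-sum array and a
-- subtraction per cell (objective: alternative decomposition, same asymptotic cost).

-- ===== PORT A =====
-- Literal port of A: an n×n zero table; for each i set cell (i,i) to A[i], then for j from i+1
-- to n-1 set cell (i,j) to cell (i,j-1) + A[j].  All indexing is in range by construction
-- (0 ≤ i ≤ j-1 < j < n), so List.getD with default matches Python's A[j] / range_sum[i][j] exactly,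
-- and Nat j-1 matches Python's j-1 since j ≥ i+1 ≥ 1.
def get_range_sum (A : List Int) : List (List Int) :=
  let n := A.length
  let init := (List.range n).map (fun _ => (List.range n).map (fun _ => (0 : Int)))
  (List.range n).foldl
    (fun t i =>
      let t1 := t.set i ((t.getD i []).set i (A.getD i 0))
      (List.range' (i + 1) (n - (i + 1))).foldl
        (fun t j => t.set i ((t.getD i []).set j ((t.getD i []).getD (j - 1) 0 + A.getD j 0)))
        t1)
    init

-- ===== PORT B =====
-- Literal port of Source B: build prefix sums P (the loop `s += a; P.append(s)` is the foldl over A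
-- carrying the pair (P, s)), then fill cell (i,j) with P[j+1] - P[i] when j ≥ i, else 0.
def get_range_sum_alt (A : List Int) : List (List Int) :=
  let n := A.length
  let P := (A.foldl (fun (ps : List Int × Int) a => (ps.1 ++ [ps.2 + a], ps.2 + a)) ([0], 0)).1
  (List.range n).map (fun i =>
    (List.range n).map (fun j =>
      if i ≤ j then P.getD (j + 1) 0 - P.getD i 0 else 0))

-- ===== PRECONDITION & SPEC =====
def Spec_get_range_sum (A : List Int) (out : List (List Int)) : Prop := out = get_range_sum_alt A
instance (A : List Int) (out : List (List Int)) : Decidable (Spec_get_range_sum A out) := by unfold Spec_get_range_sum; infer_instance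

-- ===== CLAIM (what is proved, stated in full; the proofs are below) =====
def Claim_equal_get_range_sum : Prop := ∀ (A : List Int), Dom_get_range_sum A → Spec_get_range_sum A (get_range_sum A)

-- ===== LEMMAS AND PROOFS =====

/-- Range sum A[i..j] expressed via prefix sums. -/
def rsum (A : List Int) (i j : Nat) : Int := (A.take (j + 1)).sum - (A.take i).sum

def zeroRow (A : List Int) : List Int := (List.range A.length).map (fun _ => (0 : Int))

def finalRow (A : List Int) (i : Nat) : List Int :=
  (List.range A.length).map (fun j => if i ≤ j then rsum A i j else 0)

/-- Tail of the prefix-sum scan. -/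
def scanTail (s : Int) : List Int → List Int
  | [] => []
  | a :: r => (s + a) :: scanTail (s + a) r

lemma foldl_prefix (A : List Int) : ∀ (P0 : List Int) (s : Int),
    (A.foldl (fun (ps : List Int × Int) a => (ps.1 ++ [ps.2 + a], ps.2 + a)) (P0, s)).1
      = P0 ++ scanTail s A := by
  induction A with
  | nil => intro P0 s; simp [scanTail]
  | cons a r ih =>
      intro P0 s
      simp only [List.foldl_cons, scanTail]
      rw [ih]
      simp

lemma scanTail_getD (A : List Int) : ∀ (s : Int) (k : Nat), k ≤ A.length →
    (s :: scanTail s A).getD k 0 = s + (A.take k).sum := by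
  induction A with
  | nil =>
      intro s k hk
      have hk0 : k = 0 := by simpa using hk
      subst hk0
      simp
  | cons a r ih =>
      intro s k hk
      cases k with
      | zero => simp
      | succ k' =>
          simp only [scanTail, List.getD_cons_succ, List.take_succ_cons, List.sum_cons]
          rw [ih (s + a) k' (by simpa using hk)]
          ring

lemma take_succ_sum (A : List Int) (m : Nat) (hm : m < A.length) :
    (A.take (m + 1)).sum = (A.take m).sum + A.getD m 0 := by
  rw [List.getD_eq_getElem A 0 hm]
  exact List.sum_take_succ A m hm

lemma rsum_self (A : List Int) (i : Nat) (hi : i < A.length) :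
    rsum A i i = A.getD i 0 := by
  simp [rsum, take_succ_sum A i hi]

lemma rsum_step (A : List Int) (i m : Nat) (hm : m < A.length) :
    rsum A i m = rsum A i (m - 1) + A.getD m 0 ∨ m = 0 := by
  cases m with
  | zero => exact Or.inr rfl
  | succ m' =>
      left
      simp only [Nat.add_sub_cancel, rsum]
      rw [take_succ_sum A (m' + 1) hm]
      ring

/-- A fold that only ever rewrites row `i` of the table equals setting row `i`
    to the fold over that row. -/
lemma tablefold_row (h : Nat → List Int → List Int) :
    ∀ (l : List Nat) (t : List (List Int)) (i : Nat), i < t.length →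
    l.foldl (fun t j => t.set i (h j (t.getD i []))) t
      = t.set i (l.foldl (fun r j => h j r) (t.getD i [])) := by
  intro l
  induction l with
  | nil =>
      intro t i hi
      simp only [List.foldl_nil]
      rw [List.getD_eq_getElem t [] hi]
      exact (List.set_getElem_self hi).symm
  | cons a l ih =>
      intro t i hi
      simp only [List.foldl_cons]
      rw [ih _ i (by simpa using hi)]
      have hg : (t.set i (h a (t.getD i []))).getD i [] = h a (t.getD i []) := by
        rw [List.getD_eq_getElem _ [] (by simpa using hi)]
        simp [List.getElem_set_self]
      rw [hg, List.set_set]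

/-- Invariant of A's inner loop on a single row. -/
lemma row_inv (A : List Int) (i : Nat) :
    ∀ (c m : Nat) (r : List Int), i + 1 ≤ m → m + c ≤ A.length → r.length = A.length →
    (∀ j, j < A.length → r.getD j 0 = if i ≤ j ∧ j < m then rsum A i j else 0) →
    ((List.range' m c).foldl (fun r j => r.set j (r.getD (j - 1) 0 + A.getD j 0)) r).length = A.length ∧
    (∀ j, j < A.length →
      ((List.range' m c).foldl (fun r j => r.set j (r.getD (j - 1) 0 + A.getD j 0)) r).getD j 0
        = if i ≤ j ∧ j < m + c then rsum A i j else 0) := by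
  intro c
  induction c with
  | zero => intro m r _ _ hr hinv; simpa using ⟨hr, hinv⟩
  | succ c ih =>
      intro m r him hmc hr hinv
      have hmlt : m < A.length := by omega
      rw [List.range'_succ]
      simp only [List.foldl_cons]
      set r1 := r.set m (r.getD (m - 1) 0 + A.getD m 0) with hr1
      have hr1len : r1.length = A.length := by simp [hr1, hr]
      have hval : r.getD (m - 1) 0 + A.getD m 0 = rsum A i m := by
        have h1 : r.getD (m - 1) 0 = rsum A i (m - 1) := by
          rw [hinv (m - 1) (by omega)]
          have : i ≤ m - 1 ∧ m - 1 < m := by omega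
          simp [this]
        rcases rsum_step A i m hmlt with h | h
        · rw [h1, h]
        · omega
      have hinv1 : ∀ j, j < A.length → r1.getD j 0 = if i ≤ j ∧ j < m + 1 then rsum A i j else 0 := by
        intro j hj
        by_cases hjm : j = m
        · subst hjm
          rw [List.getD_eq_getElem r1 0 (by omega : j < r1.length)]
          simp only [hr1, List.getElem_set_self]
          rw [hval]
          rw [if_pos (⟨by omega, by omega⟩ : i ≤ j ∧ j < j + 1)]
        · have : r1.getD j 0 = r.getD j 0 := by
            rw [List.getD_eq_getElem r1 0 (by omega), List.getD_eq_getElem r 0 (by omega)]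
            simp [hr1, List.getElem_set_ne (by omega : m ≠ j)]
          rw [this, hinv j hj]
          by_cases hij : i ≤ j ∧ j < m
          · rw [if_pos hij, if_pos (⟨hij.1, by omega⟩ : i ≤ j ∧ j < m + 1)]
          · rw [if_neg hij, if_neg (by omega : ¬(i ≤ j ∧ j < m + 1))]
      have := ih (m + 1) r1 (by omega) (by omega) hr1len hinv1
      refine ⟨this.1, ?_⟩
      intro j hj
      rw [this.2 j hj]
      have : (j < m + 1 + c) ↔ (j < m + (c + 1)) := by omega
      simp only [this]

lemma inner_row_eq (A : List Int) (i : Nat) (hi : i < A.length) :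
    (List.range' (i + 1) (A.length - (i + 1))).foldl
        (fun r j => r.set j (r.getD (j - 1) 0 + A.getD j 0))
        ((zeroRow A).set i (A.getD i 0))
      = finalRow A i := by
  have hzl : (zeroRow A).length = A.length := by simp [zeroRow]
  have h0 : ∀ j, j < A.length → (zeroRow A).getD j 0 = 0 := by
    intro j hj
    rw [List.getD_eq_getElem _ 0 (by omega)]
    simp [zeroRow]
  have hinv : ∀ j, j < A.length →
      ((zeroRow A).set i (A.getD i 0)).getD j 0
        = if i ≤ j ∧ j < i + 1 then rsum A i j else 0 := by
    intro j hj
    by_cases hji : j = i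
    · rw [hji]
      rw [List.getD_eq_getElem _ 0 (by rw [List.length_set, hzl]; exact hi)]
      simp only [List.getElem_set_self]
      rw [if_pos (⟨le_refl i, Nat.lt_succ_self i⟩ : i ≤ i ∧ i < i + 1)]
      exact (rsum_self A i hi).symm
    · rw [List.getD_eq_getElem _ 0 (by rw [List.length_set, hzl]; omega)]
      rw [List.getElem_set_ne (by omega : i ≠ j)]
      rw [← List.getD_eq_getElem _ 0 (by omega), h0 j hj]
      rw [if_neg (by omega : ¬(i ≤ j ∧ j < i + 1))]
  have := row_inv A i (A.length - (i + 1)) (i + 1)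
      ((zeroRow A).set i (A.getD i 0)) (le_refl _) (by omega) (by simp [hzl]) hinv
  apply List.ext_getElem (by rw [this.1]; unfold finalRow; rw [List.length_map, List.length_range])
  intro j h1 h2
  have hj : j < A.length := by omega
  have hgd := this.2 j hj
  rw [List.getD_eq_getElem _ 0 h1] at hgd
  rw [hgd]
  have hfin : (finalRow A i)[j]'h2 = if i ≤ j then rsum A i j else 0 := by
    simp [finalRow]
  rw [hfin]
  by_cases hij : i ≤ j
  · rw [if_pos (⟨hij, by omega⟩ : i ≤ j ∧ j < i + 1 + (A.length - (i + 1))), if_pos hij]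
  · rw [if_neg (by omega : ¬(i ≤ j ∧ j < i + 1 + (A.length - (i + 1)))), if_neg hij]

/-- Invariant of A's outer loop: rows below `m` are finished, rows from `m` on are zero. -/
lemma outer_inv (A : List Int) :
    ∀ (c m : Nat) (t : List (List Int)), m + c ≤ A.length → t.length = A.length →
    (∀ i, i < A.length → t.getD i [] = if i < m then finalRow A i else zeroRow A) →
    (((List.range' m c).foldl
        (fun t i =>
          let t1 := t.set i ((t.getD i []).set i (A.getD i 0))
          (List.range' (i + 1) (A.length - (i + 1))).foldl
            (fun t j => t.set i ((t.getD i []).set j ((t.getD i []).getD (j - 1) 0 + A.getD j 0)))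
            t1) t).length = A.length) ∧
    (∀ i, i < A.length →
      ((List.range' m c).foldl
        (fun t i =>
          let t1 := t.set i ((t.getD i []).set i (A.getD i 0))
          (List.range' (i + 1) (A.length - (i + 1))).foldl
            (fun t j => t.set i ((t.getD i []).set j ((t.getD i []).getD (j - 1) 0 + A.getD j 0)))
            t1) t).getD i []
        = if i < m + c then finalRow A i else zeroRow A) := by
  intro c
  induction c with
  | zero => intro m t _ ht hinv; simpa using ⟨ht, hinv⟩
  | succ c ih =>
      intro m t hmc ht hinv
      have hmlt : m < A.length := by omega
      rw [List.range'_succ]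
      simp only [List.foldl_cons]
      set t1 := t.set m ((t.getD m []).set m (A.getD m 0)) with ht1
      have ht1len : t1.length = A.length := by simp [ht1, ht]
      have hbody :
          (List.range' (m + 1) (A.length - (m + 1))).foldl
            (fun t j => t.set m ((t.getD m []).set j ((t.getD m []).getD (j - 1) 0 + A.getD j 0)))
            t1
          = t.set m (finalRow A m) := by
        rw [tablefold_row (fun j r => r.set j (r.getD (j - 1) 0 + A.getD j 0))
              (List.range' (m + 1) (A.length - (m + 1))) t1 m (by omega)]
        have hg : t1.getD m [] = (t.getD m []).set m (A.getD m 0) := by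
          rw [ht1]
          rw [List.getD_eq_getElem _ [] (by rw [List.length_set, ht]; exact hmlt)]
          simp only [List.getElem_set_self]
        rw [hg, hinv m hmlt]
        rw [if_neg (by omega : ¬ m < m)]
        rw [inner_row_eq A m hmlt, ht1, List.set_set]
      rw [hbody]
      have hset : ∀ i, i < A.length →
          (t.set m (finalRow A m)).getD i []
            = if i < m + 1 then finalRow A i else zeroRow A := by
        intro i hilt
        by_cases him : i = m
        · rw [him]
          rw [List.getD_eq_getElem _ [] (by rw [List.length_set, ht]; exact hmlt)]
          simp only [List.getElem_set_self]
          rw [if_pos (Nat.lt_succ_self m)]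
        · rw [List.getD_eq_getElem _ [] (by rw [List.length_set, ht]; omega)]
          rw [List.getElem_set_ne (by omega : m ≠ i)]
          rw [← List.getD_eq_getElem t [] (by omega), hinv i hilt]
          by_cases h : i < m
          · rw [if_pos h, if_pos (by omega)]
          · rw [if_neg h, if_neg (by omega)]
      have h12 := ih (m + 1) (t.set m (finalRow A m)) (by omega)
        (by rw [List.length_set]; exact ht) hset
      rw [show m + 1 + c = m + (c + 1) from by omega] at h12
      exact h12

lemma fold_final (A : List Int) (t : List (List Int)) (ht : t.length = A.length)
    (hz : ∀ i, i < A.length → t.getD i [] = zeroRow A) :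
    (List.range' 0 A.length).foldl
        (fun t i =>
          let t1 := t.set i ((t.getD i []).set i (A.getD i 0))
          (List.range' (i + 1) (A.length - (i + 1))).foldl
            (fun t j => t.set i ((t.getD i []).set j ((t.getD i []).getD (j - 1) 0 + A.getD j 0)))
            t1) t
      = (List.range A.length).map (finalRow A) := by
  have hinv : ∀ i, i < A.length → t.getD i [] = if i < 0 then finalRow A i else zeroRow A := by
    intro i hi
    rw [hz i hi]
    rw [if_neg (by omega)]
  obtain ⟨h1, h2⟩ := outer_inv A A.length 0 t (by omega) ht hinv
  apply List.ext_getElem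
  · rw [h1, List.length_map, List.length_range]
  · intro i g1 g2
    have hi : i < A.length := by rw [h1] at g1; exact g1
    rw [← List.getD_eq_getElem _ [] g1, h2 i hi, if_pos (by omega)]
    have hmap : (List.map (finalRow A) (List.range A.length))[i] =
        finalRow A ((List.range A.length)[i]'(by rw [List.length_range]; exact hi)) :=
      List.getElem_map _
    rw [hmap]
    congr 1
    exact (List.getElem_range _).symm

lemma a_eq_final (A : List Int) :
    get_range_sum A = (List.range A.length).map (finalRow A) := by
  have h0 : get_range_sum A = (List.range A.length).foldl
      (fun t i =>
        let t1 := t.set i ((t.getD i []).set i (A.getD i 0))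
        (List.range' (i + 1) (A.length - (i + 1))).foldl
          (fun t j => t.set i ((t.getD i []).set j ((t.getD i []).getD (j - 1) 0 + A.getD j 0)))
          t1)
      ((List.range A.length).map (fun _ => (List.range A.length).map (fun _ => (0 : Int)))) := rfl
  rw [h0]
  conv_lhs => rw [List.range_eq_range']
  apply fold_final
  · rw [List.length_map, List.length_range']
  · intro i hi
    rw [List.getD_eq_getElem _ [] (by rw [List.length_map, List.length_range']; exact hi)]
    rw [List.getElem_map]
    unfold zeroRow
    rw [List.range_eq_range']

lemma prefix_getD (A : List Int) (k : Nat) (hk : k ≤ A.length) :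
    ((A.foldl (fun (ps : List Int × Int) a => (ps.1 ++ [ps.2 + a], ps.2 + a)) ([0], 0)).1).getD k 0
      = (A.take k).sum := by
  rw [foldl_prefix A [0] 0]
  have : ([ (0:Int) ] ++ scanTail 0 A) = (0 : Int) :: scanTail 0 A := by simp
  rw [this, scanTail_getD A 0 k hk]
  ring

lemma b_eq_final (A : List Int) :
    get_range_sum_alt A = (List.range A.length).map (finalRow A) := by
  unfold get_range_sum_alt
  simp only []
  apply List.ext_getElem (by simp)
  intro i h1 h2
  simp only [List.getElem_map, List.getElem_range]
  have hi : i < A.length := by simpa using h1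
  unfold finalRow
  apply List.ext_getElem (by simp)
  intro j g1 g2
  have hj : j < A.length := by simpa using g1
  simp only [List.getElem_map, List.getElem_range]
  by_cases hij : i ≤ j
  · simp only [hij, if_true, rsum]
    rw [prefix_getD A (j + 1) (by omega), prefix_getD A i (by omega)]
  · simp [hij]

-- ===== VERDICT (by name: the statement is the Claim_ definition above) =====
theorem get_range_sum_spec : Claim_equal_get_range_sum := by
  intro A _
  unfold Spec_get_range_sum
  rw [a_eq_final, b_eq_final]
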